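-- pv_equiv track=rewrite | github.com/Bigdreamer17/LeetCode | 2086-minimum-number-of-buckets-required-to-collect-rainwater-from-houses/2086-minimum-number-of-buckets-required-to-collect-rainwater-from-houses.py | minimumBuckets
-- ===== SOURCE A (Python) =====
-- def minimumBuckets(street: str) -> int:
--     count = 0
--     street = list(street)
--     for i in range(len(street)):
--         if street[i]=="H":
--             if i > 0 and street[i-1]== "B":
--                 continue
--             if i+1<len(street) and street[i+1]==".":
--                 street[i+1]="B"
--                 count +=1
--             elif street[i-1]=="." and i-1>=0:
--                 street[i-1]="B"
--                 count +=1
--             else: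
--                 return -1
--     return count
-- ===== SOURCE B (Python) =====
-- def minimumBuckets(street: str) -> int:
--     # impossible iff some house has no adjacent empty space
--     if street == 'H' or 'HHH' in street or street.startswith('HH') or street.endswith('HH'):
--         return -1
--     # one bucket per house, minus one for each dot shared by two houses;
--     # Python's non-overlapping count('H.H') is exactly the number of shareable dots
--     return street.count('H') - street.count('H.H')
-- ===== Notes on version B (the rewrite author's own statement) =====
-- stated objective: faster
-- what changed: A simulates greedy bucket placement with a Python-level index loop over a mutated list copy; B is a loop-free string-pattern closed form evaluated by C-level str built-ins: -1 iff one of four impossibility patterns ('H' alone, 'HHH', leading/trailing 'HH') occurs, else count('H') minus the non-overlapping count('H.H'). Pre_ excludes streets mixing 'H' with characters other than 'H'/'.', where A's value is an artefact of its 'B' sentinel and wall-like treatment of foreign characters.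
-- outside the precondition, e.g. on minimumBuckets('HxH'): A returns -1, B returns 2; on minimumBuckets('BH'): A returns 0, B returns 1
import Mathlib
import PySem

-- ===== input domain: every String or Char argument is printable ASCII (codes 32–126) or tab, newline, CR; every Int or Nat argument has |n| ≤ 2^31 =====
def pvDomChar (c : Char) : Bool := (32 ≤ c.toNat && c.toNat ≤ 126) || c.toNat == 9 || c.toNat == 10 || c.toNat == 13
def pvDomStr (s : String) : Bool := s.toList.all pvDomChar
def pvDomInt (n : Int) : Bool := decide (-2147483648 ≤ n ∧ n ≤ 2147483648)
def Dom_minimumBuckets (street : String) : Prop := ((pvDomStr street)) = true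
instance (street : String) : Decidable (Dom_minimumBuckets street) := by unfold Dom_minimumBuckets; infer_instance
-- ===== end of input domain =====

-- B replaces A's greedy simulation (index loop mutating a list copy) by a loop-free
-- string-pattern closed form: -1 on the four impossibility patterns, else
-- count('H') - count('H.H').

-- ===== PORT A =====
-- the for-loop over range(len(street)) with the mutable char list `street` and the running `count`;
-- early `return -1` is the -1 result, `continue` is the plain recursive step
def minimumBucketsGo (s : List Char) (i : Nat) (count : Int) : Int :=
  if i < s.length then
    if PySem.List.pyGetD s (i : Int) ' ' = 'H' then
      if 0 < i ∧ PySem.List.pyGetD s ((i : Int) - 1) ' ' = 'B' then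
        minimumBucketsGo s (i + 1) count
      else if i + 1 < s.length ∧ PySem.List.pyGetD s ((i : Int) + 1) ' ' = '.' then
        minimumBucketsGo (s.set (i + 1) 'B') (i + 1) (count + 1)
      else if PySem.List.pyGetD s ((i : Int) - 1) ' ' = '.' ∧ (0 : Int) ≤ (i : Int) - 1 then
        minimumBucketsGo (s.set (i - 1) 'B') (i + 1) (count + 1)
      else -1
    else minimumBucketsGo s (i + 1) count
  else count
termination_by s.length - i
decreasing_by all_goals simp_all [List.length_set]; omega

def minimumBuckets (street : String) : Int :=
  minimumBucketsGo street.toList 0 0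

-- ===== PORT B =====
-- transliteration of Source B: the four impossibility patterns, else count('H') - count('H.H')
def minimumBuckets_alt (street : String) : Int :=
  if street = "H" ∨ PySem.Str.isIn "HHH" street = true
      ∨ PySem.Str.startswith street "HH" = true ∨ PySem.Str.endswith street "HH" = true then
    -1
  else
    (PySem.Str.count street "H" : Int) - (PySem.Str.count street "H.H" : Int)

-- ===== PRECONDITION & SPEC =====
-- Pre_ admits the task's natural domain (LeetCode: street[i] is 'H' or '.') and any house-free
-- string; it excludes strings mixing 'H' with foreign characters, where A's value is an artefact
-- of its implementation: a foreign character acts as a wall ('HxH' -> -1), an input 'B' collides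
-- with A's own bucket sentinel ('BH' -> 0), and street[i-1] at i = 0 wraps to the last character.
def Pre_minimumBuckets (street : String) : Prop :=
  street.toList.all (fun c => c = 'H' || c = '.') = true
    ∨ street.toList.all (fun c => c ≠ 'H') = true
instance (street : String) : Decidable (Pre_minimumBuckets street) := by unfold Pre_minimumBuckets; infer_instance

def pvWitness_minimumBuckets : String := "H.H..H"

def Spec_minimumBuckets (street : String) (out : Int) : Prop := out = minimumBuckets_alt street
instance (street : String) (out : Int) : Decidable (Spec_minimumBuckets street out) := by unfold Spec_minimumBuckets; infer_instance

-- ===== CLAIM (what is proved, stated in full; the proofs are below) =====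
def Claim_equal_minimumBuckets : Prop := ∀ (street : String), Dom_minimumBuckets street → Pre_minimumBuckets street → Spec_minimumBuckets street (minimumBuckets street)

-- ===== LEMMAS AND PROOFS =====

-- proof-internal state machine equivalent to A's loop: one pass over (char, next char)
-- pairs with state (carry = a bucket was just placed on this position, prev, count)
def pvStateGo : List (Char × Char) → Bool → Char → Int → Int
  | [], _, _, count => count
  | (cur, nxt) :: rest, carry, prev, count =>
    let eff := if carry then 'B' else cur
    if eff = 'H' ∧ prev ≠ 'B' then
      if nxt = '.' then pvStateGo rest true eff (count + 1)
      else if prev = '.' then pvStateGo rest false eff (count + 1)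
      else -1
    else pvStateGo rest false eff count

-- the non-overlapping 'H.H' count (Python's str.count scans left to right, skipping past a match)
def pvCntHDH : List Char → Nat
  | [] => 0
  | c :: r => if ['H', '.', 'H'].isPrefixOf (c :: r) then pvCntHDH (r.drop 2) + 1 else pvCntHDH r
termination_by l => l.length
decreasing_by all_goals (simp; try omega)

-- stuck-house condition when the position left of l holds a free dot
def pvBad1 (l : List Char) : Bool := decide (['H','H','H'] <:+: l) || decide (['H','H'] <:+ l)
-- stuck-house condition when it does not
def pvBad0 (l : List Char) : Bool :=
  decide (l = ['H']) || decide (['H','H'] <+: l) || pvBad1 l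

theorem pyGetD_append_self (p t : List Char) (d : Char) :
    PySem.List.pyGetD (p ++ t) (p.length : Int) d = t.getD 0 d := by
  rw [PySem.List.pyGetD_natCast]
  simp [List.getD, List.getElem?_append_right]

theorem pyGetD_append_succ (p t : List Char) (d : Char) :
    PySem.List.pyGetD (p ++ t) ((p.length : Int) + 1) d = t.getD 1 d := by
  rw [show ((p.length : Int) + 1) = ((p.length + 1 : Nat) : Int) from by push_cast; ring,
    PySem.List.pyGetD_natCast]
  simp [List.getD, List.getElem?_append_right]

theorem pyGetD_append_pred (p t : List Char) (d : Char) (hp : p ≠ []) :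
    PySem.List.pyGetD (p ++ t) ((p.length : Int) - 1) d = (p.getLast?).getD d := by
  have hl : 0 < p.length := List.length_pos_of_ne_nil hp
  rw [show ((p.length : Int) - 1) = ((p.length - 1 : Nat) : Int) from by push_cast [hl]; omega,
    PySem.List.pyGetD_natCast]
  simp [List.getD, List.getElem?_append, hl, List.getLast?_eq_getElem?]

theorem set_append_right {α : Type} (p t : List α) (i : Nat) (v : α) (h : p.length ≤ i) :
    (p ++ t).set i v = p ++ t.set (i - p.length) v := by
  rw [List.set_append]; simp [Nat.not_lt.mpr h]

-- one iteration of A's loop, with every index expression of the port resolved at i = p.length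
theorem aGo_cons_step (p : List Char) (c0 : Char) (t : List Char) (c : Int) :
    minimumBucketsGo (p ++ c0 :: t) p.length c =
      if c0 = 'H' then
        if 0 < p.length ∧ (p.getLast?).getD ' ' = 'B' then
          minimumBucketsGo (p ++ c0 :: t) (p.length + 1) c
        else if 0 < t.length ∧ t.getD 0 ' ' = '.' then
          minimumBucketsGo (p ++ c0 :: t.set 0 'B') (p.length + 1) (c + 1)
        else if (p.getLast?).getD ' ' = '.' ∧ p ≠ [] then
          minimumBucketsGo (p.set (p.length - 1) 'B' ++ c0 :: t) (p.length + 1) (c + 1)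
        else -1
      else minimumBucketsGo (p ++ c0 :: t) (p.length + 1) c := by
  rw [minimumBucketsGo]
  have hi : p.length < (p ++ c0 :: t).length := by simp
  rw [if_pos hi, pyGetD_append_self]
  have e0 : (c0 :: t).getD 0 ' ' = c0 := rfl
  rw [e0]
  have c1 : (0 < p.length ∧ PySem.List.pyGetD (p ++ c0 :: t) ((p.length : Int) - 1) ' ' = 'B')
      ↔ (0 < p.length ∧ (p.getLast?).getD ' ' = 'B') := by
    rcases List.eq_nil_or_concat p with rfl | ⟨q, a, rfl⟩
    · simp
    · rw [pyGetD_append_pred _ _ _ (by simp)]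
  have c3 : (PySem.List.pyGetD (p ++ c0 :: t) ((p.length : Int) - 1) ' ' = '.' ∧ (0:Int) ≤ (p.length : Int) - 1)
      ↔ ((p.getLast?).getD ' ' = '.' ∧ p ≠ []) := by
    rcases List.eq_nil_or_concat p with rfl | ⟨q, a, rfl⟩
    · simp
    · rw [pyGetD_append_pred _ _ _ (by simp)]
      have h2 : (q ++ [a] : List Char) ≠ [] := by simp
      simp [h2]
  have c2 : (p.length + 1 < (p ++ c0 :: t).length ∧ PySem.List.pyGetD (p ++ c0 :: t) ((p.length : Int) + 1) ' ' = '.')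
      ↔ (0 < t.length ∧ t.getD 0 ' ' = '.') := by
    rw [pyGetD_append_succ]
    have e1 : (c0 :: t).getD 1 ' ' = t.getD 0 ' ' := rfl
    rw [e1]
    have e2 : p.length + 1 < (p ++ c0 :: t).length ↔ 0 < t.length := by simp
    rw [e2]
  simp only [c1, c2, c3]
  by_cases hH : c0 = 'H'
  · rw [if_pos hH, if_pos hH]
    split_ifs with h1 h2 h3 <;> try rfl
    · rw [set_append_right _ _ _ _ (by omega)]
      have e3 : p.length + 1 - p.length = 1 := by omega
      rw [e3]
      rfl
    · rw [List.set_append]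
      have e4 : p.length - 1 < p.length := by
        have := List.length_pos_of_ne_nil h3.2
        omega
      rw [if_pos e4]
  · rw [if_neg hH, if_neg hH]

-- for a nonempty prefix the default of getD is irrelevant
theorem getLastD_irrel (p : List Char) (hp : p ≠ []) (d1 d2 : Char) :
    (p.getLast?).getD d1 = (p.getLast?).getD d2 := by
  cases hl : p.getLast? with
  | none => exact absurd (List.getLast?_eq_none_iff.mp hl) hp
  | some y => rfl

-- the loop invariant tying A's loop to the state machine: p is the already-processed (possibly
-- mutated) prefix, t the untouched original suffix, carry says whether A has just written
-- a 'B' onto t's first position, and the machine's prev is exactly the last character of p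
theorem aGo_stateGo : ∀ (t p : List Char) (c : Int) (carry : Bool),
    minimumBucketsGo (p ++ (if carry then t.set 0 'B' else t)) p.length c =
      pvStateGo (t.zip (t.drop 1 ++ ['#'])) carry ((p.getLast?).getD '#') c := by
  intro t
  induction t with
  | nil =>
    intro p c carry
    rw [show (if carry then ([] : List Char).set 0 'B' else []) = [] from by cases carry <;> rfl]
    rw [List.append_nil, minimumBucketsGo]
    simp [pvStateGo]
  | cons c0 r ih =>
    intro p c carry
    rw [show (if carry then (c0 :: r).set 0 'B' else (c0 :: r)) = (if carry then 'B' else c0) :: r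
      from by cases carry <;> rfl]
    rw [show (c0 :: r).zip ((c0 :: r).drop 1 ++ ['#']) = (c0, r.headD '#') :: r.zip (r.drop 1 ++ ['#'])
      from by cases r <;> simp]
    rw [aGo_cons_step]
    rw [show pvStateGo ((c0, r.headD '#') :: r.zip (r.drop 1 ++ ['#'])) carry ((p.getLast?).getD '#') c =
        (let eff := if carry then 'B' else c0;
         if eff = 'H' ∧ (p.getLast?).getD '#' ≠ 'B' then
           if r.headD '#' = '.' then pvStateGo (r.zip (r.drop 1 ++ ['#'])) true eff (c + 1)
           else if (p.getLast?).getD '#' = '.' then pvStateGo (r.zip (r.drop 1 ++ ['#'])) false eff (c + 1)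
           else -1
         else pvStateGo (r.zip (r.drop 1 ++ ['#'])) false eff c)
      from rfl]
    simp only []
    generalize (if carry = true then 'B' else c0) = eff
    by_cases hH : eff = 'H'
    · rw [if_pos hH]
      by_cases hB : (p.getLast?).getD '#' = 'B'
      · -- the previous position holds a bucket: A continues, the machine skips
        have hp : p ≠ [] := by
          intro e; subst e; simp at hB
        rw [if_pos ⟨List.length_pos_of_ne_nil hp, by rw [getLastD_irrel p hp ' ' '#']; exact hB⟩]
        rw [if_neg (by simp [hB] : ¬ (eff = 'H' ∧ (p.getLast?).getD '#' ≠ 'B'))]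
        rw [show p ++ eff :: r = (p ++ [eff]) ++ r from by simp]
        rw [show p.length + 1 = (p ++ [eff]).length from by simp]
        rw [show ((p ++ [eff]) ++ r) = ((p ++ [eff]) ++ (if false then r.set 0 'B' else r)) from rfl]
        rw [ih (p ++ [eff]) c false]
        rw [List.getLast?_concat]
        rfl
      · have hc1 : ¬ (0 < p.length ∧ (p.getLast?).getD ' ' = 'B') := by
          rintro ⟨hp0, hlb⟩
          have hp : p ≠ [] := by intro e; subst e; simp at hp0
          exact hB (by rw [getLastD_irrel p hp '#' ' ']; exact hlb)
        rw [if_neg hc1]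
        by_cases hn : r.headD '#' = '.'
        · -- a free dot on the right: both place a bucket there
          have hr : 0 < r.length ∧ r.getD 0 ' ' = '.' := by
            cases r with
            | nil => simp at hn
            | cons c1 r1 => exact ⟨by simp, hn⟩
          rw [if_pos hr, if_pos ⟨hH, hB⟩, if_pos hn]
          rw [show p ++ eff :: r.set 0 'B' = (p ++ [eff]) ++ r.set 0 'B' from by simp]
          rw [show p.length + 1 = (p ++ [eff]).length from by simp]
          rw [show ((p ++ [eff]) ++ r.set 0 'B') = ((p ++ [eff]) ++ (if true then r.set 0 'B' else r)) from rfl]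
          rw [ih (p ++ [eff]) (c + 1) true]
          rw [List.getLast?_concat]
          rfl
        · have hr : ¬ (0 < r.length ∧ r.getD 0 ' ' = '.') := by
            rintro ⟨hr0, hrd⟩
            cases r with
            | nil => simp at hr0
            | cons c1 r1 => exact hn hrd
          rw [if_neg hr, if_neg hn]
          by_cases hp : (p.getLast?).getD '#' = '.'
          · -- a free dot on the left: both place a bucket there
            have hpn : p ≠ [] := by intro e; subst e; simp at hp
            rw [if_pos ⟨by rw [getLastD_irrel p hpn ' ' '#']; exact hp, hpn⟩,
              if_pos ⟨hH, hB⟩, if_pos hp]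
            rw [show p.set (p.length - 1) 'B' ++ eff :: r = ((p.set (p.length - 1) 'B') ++ [eff]) ++ r from by simp]
            rw [show p.length + 1 = ((p.set (p.length - 1) 'B') ++ [eff]).length from by simp]
            rw [show (((p.set (p.length - 1) 'B') ++ [eff]) ++ r) = (((p.set (p.length - 1) 'B') ++ [eff]) ++ (if false then r.set 0 'B' else r)) from rfl]
            rw [ih ((p.set (p.length - 1) 'B') ++ [eff]) (c + 1) false]
            rw [List.getLast?_concat]
            rfl
          · -- stuck house: both return -1
            have hc3 : ¬ ((p.getLast?).getD ' ' = '.' ∧ p ≠ []) := by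
              rintro ⟨hlp, hpn⟩
              exact hp (by rw [getLastD_irrel p hpn '#' ' ']; exact hlp)
            rw [if_neg hc3, if_pos ⟨hH, hB⟩, if_neg hp]
    · -- not a house (or a freshly placed bucket): plain skip
      rw [if_neg hH, if_neg (by simp [hH] : ¬ (eff = 'H' ∧ (p.getLast?).getD '#' ≠ 'B'))]
      rw [show p ++ eff :: r = (p ++ [eff]) ++ r from by simp]
      rw [show p.length + 1 = (p ++ [eff]).length from by simp]
      rw [show ((p ++ [eff]) ++ r) = ((p ++ [eff]) ++ (if false then r.set 0 'B' else r)) from rfl]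
      rw [ih (p ++ [eff]) c false]
      rw [List.getLast?_concat]
      rfl

-- helper Bad-rewrites used in the main induction
theorem bad1_cons_dot (r : List Char) : pvBad1 ('.' :: r) = pvBad1 r := by
  simp [pvBad1, List.infix_cons_iff, List.suffix_cons_iff, List.cons_prefix_cons]

theorem bad0_cons_dot (r : List Char) : pvBad0 ('.' :: r) = pvBad1 r := by
  simp [pvBad0, List.cons_prefix_cons, bad1_cons_dot]

theorem bad1_hdh (r : List Char) : pvBad1 ('H' :: '.' :: 'H' :: r) = pvBad0 r := by
  simp only [pvBad0, pvBad1, List.infix_cons_iff, List.suffix_cons_iff, List.cons_prefix_cons]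
  simp [eq_comm, Bool.or_comm, Bool.or_left_comm, Bool.or_assoc]

theorem bad0_hdh (r : List Char) : pvBad0 ('H' :: '.' :: 'H' :: r) = pvBad0 r := by
  simp only [pvBad0, pvBad1, List.infix_cons_iff, List.suffix_cons_iff, List.cons_prefix_cons]
  simp [eq_comm, Bool.or_comm, Bool.or_left_comm, Bool.or_assoc]

theorem bad_hd (r : List Char) (hr : r.head? ≠ some 'H') :
    pvBad1 ('H' :: '.' :: r) = pvBad0 r ∧ pvBad0 ('H' :: '.' :: r) = pvBad0 r := by
  have h1 : ¬ (['H'] = r) := by rintro rfl; simp at hr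
  have h1' : ¬ (r = ['H']) := fun h => h1 h.symm
  have h2 : ¬ (['H','H'] <+: r) := by
    cases r with
    | nil => simp
    | cons c t =>
      rw [List.cons_prefix_cons]
      rintro ⟨rfl, -⟩
      simp at hr
  constructor <;>
    simp [pvBad0, pvBad1, List.infix_cons_iff, List.suffix_cons_iff, List.cons_prefix_cons,
      h1, h1', h2]

theorem bad1_h (r : List Char) : pvBad1 ('H' :: r) = pvBad0 r := by
  simp only [pvBad0, pvBad1, List.infix_cons_iff, List.suffix_cons_iff, List.cons_prefix_cons]
  simp [eq_comm, Bool.or_comm, Bool.or_left_comm, Bool.or_assoc]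

theorem bad0_h_true (r : List Char) (hr : r.head? = some 'H' ∨ r = []) :
    pvBad0 ('H' :: r) = true := by
  rcases hr with h | rfl
  · cases r with
    | nil => simp at h
    | cons c t => cases h; simp [pvBad0, List.cons_prefix_cons]
  · simp [pvBad0]

-- the concrete-pattern equations of pvCntHDH
theorem cnt_hdh (r : List Char) : pvCntHDH ('H' :: '.' :: 'H' :: r) = pvCntHDH r + 1 := by
  rw [pvCntHDH]; simp [List.isPrefixOf]

theorem cnt_dot (r : List Char) : pvCntHDH ('.' :: r) = pvCntHDH r := by
  rw [pvCntHDH]; simp [List.isPrefixOf]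

theorem cnt_hd (r : List Char) (hr : r.head? ≠ some 'H') :
    pvCntHDH ('H' :: '.' :: r) = pvCntHDH r := by
  rw [pvCntHDH]
  cases r with
  | nil => simp [List.isPrefixOf, pvCntHDH]
  | cons c t => simp at hr; simp [List.isPrefixOf, Ne.symm hr, pvCntHDH]

theorem cnt_h (r : List Char) (hr : r.head? ≠ some '.') :
    pvCntHDH ('H' :: r) = pvCntHDH r := by
  rw [pvCntHDH]
  cases r with
  | nil => simp [List.isPrefixOf]
  | cons c t => simp at hr; simp [List.isPrefixOf, Ne.symm hr]

theorem pairs_cons (c : Char) (r : List Char) :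
    (c :: r).zip ((c :: r).drop 1 ++ ['#']) = (c, r.headD '#') :: r.zip (r.drop 1 ++ ['#']) := by
  cases r <;> simp

-- the closed form of the state machine's run, the heart of the equivalence
theorem stateGo_closed : ∀ (n : Nat) (l : List Char) (prev : Char) (count : Int),
    l.length ≤ n →
    (∀ c ∈ l, c = 'H' ∨ c = '.') →
    (prev = 'B' → l.head? ≠ some 'H') →
    pvStateGo (l.zip (l.drop 1 ++ ['#'])) false prev count =
      if (if prev = '.' then pvBad1 l else pvBad0 l) then -1
      else count + (l.count 'H' : Int) - (pvCntHDH l : Int) := by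
  intro n
  induction n with
  | zero =>
    intro l prev count h _ _
    cases l with
    | nil => simp [pvStateGo, pvBad1, pvBad0, pvCntHDH]
    | cons c t => simp at h
  | succ n ih =>
    intro l prev count h hchars hpb
    cases l with
    | nil => simp [pvStateGo, pvBad1, pvBad0, pvCntHDH]
    | cons c r =>
      rw [pairs_cons]
      rcases hchars c (by simp) with hc | hc
      · -- c = 'H'
        subst hc
        have hprev : prev ≠ 'B' := fun h' => (hpb h') rfl
        rw [show pvStateGo (('H', r.headD '#') :: r.zip (r.drop 1 ++ ['#'])) false prev count =
            (if ('H' : Char) = 'H' ∧ prev ≠ 'B' then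
              if r.headD '#' = '.' then pvStateGo (r.zip (r.drop 1 ++ ['#'])) true 'H' (count + 1)
              else if prev = '.' then pvStateGo (r.zip (r.drop 1 ++ ['#'])) false 'H' (count + 1)
              else -1
            else pvStateGo (r.zip (r.drop 1 ++ ['#'])) false 'H' count) from rfl]
        rw [if_pos ⟨rfl, hprev⟩]
        by_cases hn : r.headD '#' = '.'
        · -- a dot to the right: the house takes it
          obtain ⟨r2, rfl⟩ : ∃ r2, r = '.' :: r2 := by
            cases r with
            | nil => simp at hn
            | cons a t => simp at hn; exact ⟨t, by rw [hn]⟩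
          rw [if_pos (show ('.'::r2).headD '#' = '.' from rfl)]
          rw [pairs_cons]
          rw [show pvStateGo (('.', r2.headD '#') :: r2.zip (r2.drop 1 ++ ['#'])) true 'H' (count + 1) =
              pvStateGo (r2.zip (r2.drop 1 ++ ['#'])) false 'B' (count + 1) from by
            simp [pvStateGo]]
          by_cases h2 : r2.head? = some 'H'
          · -- 'H.H' block: the third house is served by the shared bucket
            obtain ⟨r3, rfl⟩ : ∃ r3, r2 = 'H' :: r3 := by
              cases r2 with
              | nil => simp at h2
              | cons a t => cases h2; exact ⟨t, rfl⟩
            rw [pairs_cons]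
            rw [show pvStateGo (('H', r3.headD '#') :: r3.zip (r3.drop 1 ++ ['#'])) false 'B' (count + 1) =
                pvStateGo (r3.zip (r3.drop 1 ++ ['#'])) false 'H' (count + 1) from by
              simp [pvStateGo]]
            rw [ih r3 'H' (count + 1) (by simp at h; omega)
              (fun x hx => hchars x (by simp [hx])) (by simp)]
            rw [show (if ('H' : Char) = '.' then pvBad1 r3 else pvBad0 r3) = pvBad0 r3 from by simp]
            rw [bad1_hdh, bad0_hdh, ite_self, cnt_hdh]
            split_ifs with hb
            · rfl
            · simp [List.count_cons]
              push_cast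
              ring
          · -- lone 'H.' pair: the bucket is not shared
            rw [ih r2 'B' (count + 1) (by simp at h; omega)
              (fun x hx => hchars x (by simp [hx])) (fun _ => h2)]
            rw [show (if ('B' : Char) = '.' then pvBad1 r2 else pvBad0 r2) = pvBad0 r2 from by simp]
            rw [(bad_hd r2 h2).1, (bad_hd r2 h2).2, ite_self, cnt_hd r2 h2]
            split_ifs with hb
            · rfl
            · simp [List.count_cons]
              push_cast
              ring
        · -- no dot to the right
          by_cases hp : prev = '.'
          · -- the house takes the dot on its left
            rw [if_neg hn, if_pos hp]
            have hr' : r.head? ≠ some '.' := by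
              cases r with
              | nil => simp
              | cons a t => simpa using hn
            rw [ih r 'H' (count + 1) (by simp at h; omega)
              (fun x hx => hchars x (by simp [hx])) (by simp)]
            rw [show (if ('H' : Char) = '.' then pvBad1 r else pvBad0 r) = pvBad0 r from by simp]
            rw [hp]
            rw [show (if ('.' : Char) = '.' then pvBad1 ('H' :: r) else pvBad0 ('H' :: r)) = pvBad1 ('H' :: r) from by simp]
            rw [bad1_h, cnt_h r hr']
            split_ifs with hb
            · rfl
            · simp [List.count_cons]
              push_cast
              ring
          · -- stuck house: -1 on both sides
            rw [if_neg hn, if_neg hp]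
            have hb : pvBad0 ('H' :: r) = true := by
              apply bad0_h_true
              cases r with
              | nil => right; rfl
              | cons a t =>
                left
                rcases hchars a (by simp) with ha | ha
                · simp [ha]
                · exfalso; apply hn; simp [ha]
            rw [if_neg hp, hb]
            simp
      · -- c = '.'
        subst hc
        rw [show pvStateGo (('.', r.headD '#') :: r.zip (r.drop 1 ++ ['#'])) false prev count =
            pvStateGo (r.zip (r.drop 1 ++ ['#'])) false '.' count from by
          simp [pvStateGo]]
        rw [ih r '.' count (by simp at h; omega)
          (fun x hx => hchars x (by simp [hx])) (by simp)]
        rw [show (if ('.' : Char) = '.' then pvBad1 r else pvBad0 r) = pvBad1 r from by simp]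
        rw [bad1_cons_dot, bad0_cons_dot, ite_self, cnt_dot]
        split_ifs with hb
        · rfl
        · simp [List.count_cons]

-- bridges from B's PySem.Chars.count to List.count 'H' / pvCntHDH
theorem countgo_H : ∀ (fuel : Nat) (l : List Char) (acc : Nat), l.length ≤ fuel →
    PySem.Chars.count.go ['H'] fuel l acc = acc + l.count 'H' := by
  intro fuel
  induction fuel with
  | zero =>
    intro l acc h
    cases l with
    | nil => simp [PySem.Chars.count.go]
    | cons c t => simp at h
  | succ n ih =>
    intro l acc h
    cases l with
    | nil => simp [PySem.Chars.count.go]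
    | cons c t =>
      rw [PySem.Chars.count.go]
      by_cases hc : c = 'H'
      · subst hc
        rw [if_pos (by simp [List.isPrefixOf])]
        rw [ih _ _ (by simp at h ⊢; omega)]
        simp [List.count_cons]
        omega
      · rw [if_neg (by simp [List.isPrefixOf, Ne.symm hc])]
        rw [ih _ _ (by simp at h; omega)]
        simp [List.count_cons, hc]

theorem count_H_eq (l : List Char) : PySem.Chars.count l ['H'] = l.count 'H' := by
  rw [PySem.Chars.count, if_neg (by simp)]
  simpa using countgo_H l.length l 0 le_rfl

theorem countgo_HDH : ∀ (fuel : Nat) (l : List Char) (acc : Nat), l.length ≤ fuel →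
    PySem.Chars.count.go ['H', '.', 'H'] fuel l acc = acc + pvCntHDH l := by
  intro fuel
  induction fuel with
  | zero =>
    intro l acc h
    cases l with
    | nil => simp [PySem.Chars.count.go, pvCntHDH]
    | cons c t => simp at h
  | succ n ih =>
    intro l acc h
    cases l with
    | nil => simp [PySem.Chars.count.go, pvCntHDH]
    | cons c t =>
      rw [PySem.Chars.count.go, pvCntHDH]
      by_cases hp : (['H', '.', 'H'] : List Char).isPrefixOf (c :: t) = true
      · rw [if_pos hp, if_pos hp]
        rw [ih _ _ (by simp at h ⊢; omega)]
        have hd : List.drop (['H', '.', 'H'] : List Char).length (c :: t) = t.drop 2 := by simp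
        rw [hd]
        omega
      · rw [if_neg hp, if_neg hp]
        rw [ih _ _ (by simp at h; omega)]

theorem count_HDH_eq (l : List Char) : PySem.Chars.count l ['H', '.', 'H'] = pvCntHDH l := by
  rw [PySem.Chars.count, if_neg (by simp)]
  simpa using countgo_HDH l.length l 0 le_rfl

-- B's impossibility test, restated on the list side
theorem cond_iff (street : String) : pvBad0 street.toList = true ↔
    (street = "H" ∨ PySem.Str.isIn "HHH" street = true
      ∨ PySem.Str.startswith street "HH" = true ∨ PySem.Str.endswith street "HH" = true) := by
  have e1 : street.toList = ['H'] ↔ street = "H" := by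
    constructor
    · intro h; exact String.toList_inj.mp (by simpa using h)
    · rintro rfl; decide
  have e2 : (['H','H','H'] : List Char) <:+: street.toList ↔ PySem.Str.isIn "HHH" street = true := by
    rw [PySem.Str.isIn_iff_infix, show ("HHH" : String).toList = ['H','H','H'] from by decide]
  have e3 : (['H','H'] : List Char) <+: street.toList ↔ PySem.Str.startswith street "HH" = true := by
    simp [PySem.Chars.startswith_iff]
  have e4 : (['H','H'] : List Char) <:+ street.toList ↔ PySem.Str.endswith street "HH" = true := by
    simp [PySem.Chars.endswith_iff]
  simp only [pvBad0, pvBad1, Bool.or_eq_true, decide_eq_true_eq, e1, e2, e3, e4]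
  tauto

theorem count_H_str (street : String) : PySem.Str.count street "H" = street.toList.count 'H' := by
  rw [show PySem.Str.count street "H" = PySem.Chars.count street.toList ['H'] from by simp]
  exact count_H_eq _

theorem count_HDH_str (street : String) : PySem.Str.count street "H.H" = pvCntHDH street.toList := by
  rw [show PySem.Str.count street "H.H" = PySem.Chars.count street.toList ['H','.','H'] from by
    simp [show ("H.H" : String).toList = ['H','.','H'] from by decide]]
  exact count_HDH_eq _

-- on a street without houses both programs yield 0
theorem stateGo_noH : ∀ (l : List Char) (prev : Char) (count : Int),
    (∀ c ∈ l, c ≠ 'H') →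
    pvStateGo (l.zip (l.drop 1 ++ ['#'])) false prev count = count := by
  intro l
  induction l with
  | nil => intro prev count _; rfl
  | cons c r ih =>
    intro prev count hno
    rw [pairs_cons]
    rw [show pvStateGo ((c, r.headD '#') :: r.zip (r.drop 1 ++ ['#'])) false prev count =
        (if c = 'H' ∧ prev ≠ 'B' then
          if r.headD '#' = '.' then pvStateGo (r.zip (r.drop 1 ++ ['#'])) true c (count + 1)
          else if prev = '.' then pvStateGo (r.zip (r.drop 1 ++ ['#'])) false c (count + 1)
          else -1
        else pvStateGo (r.zip (r.drop 1 ++ ['#'])) false c count) from rfl]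
    rw [if_neg (fun h => hno c (by simp) h.1)]
    exact ih c count (fun x hx => hno x (by simp [hx]))

theorem cnt_noH (l : List Char) (hno : ∀ c ∈ l, c ≠ 'H') : pvCntHDH l = 0 := by
  induction l with
  | nil => simp [pvCntHDH]
  | cons c r ih =>
    rw [pvCntHDH, if_neg (fun hp => hno c (by simp)
      (List.cons_prefix_cons.mp (List.isPrefixOf_iff_prefix.mp hp)).1.symm)]
    exact ih (fun x hx => hno x (by simp [hx]))

-- ===== VERDICT (by name: the statement is the Claim_ definition above) =====
theorem minimumBuckets_spec : Claim_equal_minimumBuckets := by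
  unfold Claim_equal_minimumBuckets
  intro street _ hpre0
  unfold Pre_minimumBuckets at hpre0
  rcases hpre0 with hpre0 | hno0
  case inr =>
    -- no house at all: both sides are 0
    have hno : ∀ c ∈ street.toList, c ≠ 'H' := by simpa using hno0
    unfold Spec_minimumBuckets minimumBuckets minimumBuckets_alt
    have hA : minimumBucketsGo street.toList 0 0 =
        pvStateGo (street.toList.zip (street.toList.drop 1 ++ ['#'])) false '#' 0 := by
      simpa using aGo_stateGo street.toList [] 0 false
    rw [hA, stateGo_noH street.toList '#' 0 hno]
    have hcF : ¬ (street = "H" ∨ PySem.Str.isIn "HHH" street = true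
        ∨ PySem.Str.startswith street "HH" = true ∨ PySem.Str.endswith street "HH" = true) := by
      rintro (rfl | h | h | h)
      · exact hno 'H' (by decide) rfl
      · rw [PySem.Str.isIn_iff_infix] at h
        exact hno 'H' (h.subset (by decide)) rfl
      · rw [show PySem.Str.startswith street "HH" = PySem.Chars.startswith street.toList ['H','H'] from by simp] at h
        exact hno 'H' ((PySem.Chars.startswith_iff _ _).mp h |>.subset (by decide)) rfl
      · rw [show PySem.Str.endswith street "HH" = PySem.Chars.endswith street.toList ['H','H'] from by simp] at h
        exact hno 'H' ((PySem.Chars.endswith_iff _ _).mp h |>.subset (by decide)) rfl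
    rw [if_neg hcF, count_H_str, count_HDH_str,
      List.count_eq_zero.mpr (fun h => hno 'H' h rfl), cnt_noH street.toList hno]
    rfl
  have hpre : ∀ c ∈ street.toList, c = 'H' ∨ c = '.' := by
    simpa using hpre0
  unfold Spec_minimumBuckets minimumBuckets minimumBuckets_alt
  have hA : minimumBucketsGo street.toList 0 0 =
      pvStateGo (street.toList.zip (street.toList.drop 1 ++ ['#'])) false '#' 0 := by
    simpa using aGo_stateGo street.toList [] 0 false
  rw [hA, stateGo_closed street.toList.length street.toList '#' 0 le_rfl hpre
    (fun h => absurd h (by decide))]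
  rw [show (if ('#' : Char) = '.' then pvBad1 street.toList else pvBad0 street.toList)
      = pvBad0 street.toList from by simp]
  by_cases hb : pvBad0 street.toList = true
  · rw [if_pos hb, if_pos ((cond_iff street).mp hb)]
  · rw [if_neg hb, if_neg (fun hp => hb ((cond_iff street).mpr hp))]
    rw [count_H_str, count_HDH_str]
    ring
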